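-- pv_equiv track=rewrite | github.com/Ucutum/TradingBot | learning_ai.py | slice_to_sections
-- ===== SOURCE A (Python) =====
-- def slice_to_sections(data, x_sections_cnt, y_sections_cnt):
--   sections_cnt = x_sections_cnt + y_sections_cnt
--   section_count = len(data) // (sections_cnt)
--   xs = []
--   for i in range(x_sections_cnt):
--     xs.append(data[i::sections_cnt])
--   ys = []
--   for i in range(x_sections_cnt, x_sections_cnt + y_sections_cnt):
--     ys.append(data[i::sections_cnt])
--   min_section_size = min(min([len(i) for i in xs]), min(len(i) for i in ys))
--   for i in range(x_sections_cnt):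
--     xs[i] = xs[i][:min_section_size]
--   for i in range(y_sections_cnt):
--     ys[i] = ys[i][:min_section_size]
--   return xs, ys
-- ===== SOURCE B (Python) =====
-- def slice_to_sections(data, x_sections_cnt, y_sections_cnt):
--     sections_cnt = x_sections_cnt + y_sections_cnt
--     min_section_size = len(data) // sections_cnt
--     cols = [[data[i + k * sections_cnt] for k in range(min_section_size)]
--             for i in range(sections_cnt)]
--     return cols[:x_sections_cnt], cols[x_sections_cnt:]
-- ===== Notes on version B (the rewrite author's own statement) =====
-- stated objective: simpler
-- what changed: B replaces A's N strided slices, the two min() scans over section lengths and the per-section trimming loops by the closed form min_section_size = len(data) // sections_cnt and a single direct-indexing comprehension building each trimmed column at once.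
import Mathlib
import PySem

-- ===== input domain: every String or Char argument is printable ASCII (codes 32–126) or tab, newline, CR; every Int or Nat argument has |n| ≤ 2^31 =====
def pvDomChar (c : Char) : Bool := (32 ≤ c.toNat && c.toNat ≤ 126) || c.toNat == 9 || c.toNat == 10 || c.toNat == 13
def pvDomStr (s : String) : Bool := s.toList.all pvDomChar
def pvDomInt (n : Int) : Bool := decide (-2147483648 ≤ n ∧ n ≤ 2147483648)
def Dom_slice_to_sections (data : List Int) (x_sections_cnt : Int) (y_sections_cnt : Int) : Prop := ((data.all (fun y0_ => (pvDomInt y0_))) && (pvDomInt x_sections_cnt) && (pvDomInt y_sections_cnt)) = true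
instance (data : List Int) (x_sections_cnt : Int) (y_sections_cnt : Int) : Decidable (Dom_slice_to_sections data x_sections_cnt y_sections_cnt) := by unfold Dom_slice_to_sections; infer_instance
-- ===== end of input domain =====

-- B replaces A's N strided slices and two min() scans by the closed form
-- min_section_size = len(data) // sections_cnt and one direct indexing comprehension
-- (objective: simpler — no min pass, no per-section slicing/trimming).

-- ===== PORT A =====
-- `for i in range(…): xs.append(data[i::cnt])` is the foldl appending one slice per index;
-- `slice? … = none` only for step 0 (sections_cnt = 0) and `min? = none` only on empty
-- section lists — both excluded by Pre_, so `.getD` defaults are never reached there.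
-- `xs[i] = xs[i][:msz]` over all i of xs is the map over xs.
def slice_to_sections (data : List Int) (x_sections_cnt : Int) (y_sections_cnt : Int) : List (List Int) × List (List Int) :=
  let sections_cnt := x_sections_cnt + y_sections_cnt
  let _section_count := PySem.Int.floordiv (data.length : Int) sections_cnt  -- dead in A; Python raises ZeroDivisionError iff sections_cnt = 0 (outside Pre_)
  let xs := (PySem.List.pyRange 0 x_sections_cnt 1).foldl
    (fun acc i => acc ++ [(PySem.List.slice? data (some i) none sections_cnt).getD []]) []
  let ys := (PySem.List.pyRange x_sections_cnt (x_sections_cnt + y_sections_cnt) 1).foldl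
    (fun acc i => acc ++ [(PySem.List.slice? data (some i) none sections_cnt).getD []]) []
  let min_section_size := min
    ((PySem.List.min? (xs.map (fun (l : List Int) => (l.length : Int))) (fun v => v)).getD 0)
    ((PySem.List.min? (ys.map (fun (l : List Int) => (l.length : Int))) (fun v => v)).getD 0)
  (xs.map (fun l => PySem.List.slice l none (some min_section_size)),
   ys.map (fun l => PySem.List.slice l none (some min_section_size)))

-- ===== PORT B =====
-- `data[i + k*cnt]` is always in range in B's comprehension; `.getD 0` is never reached.
def slice_to_sections_alt (data : List Int) (x_sections_cnt : Int) (y_sections_cnt : Int) : List (List Int) × List (List Int) :=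
  let sections_cnt := x_sections_cnt + y_sections_cnt
  let min_section_size := PySem.Int.floordiv (data.length : Int) sections_cnt
  let cols := (PySem.List.pyRange 0 sections_cnt 1).map
    (fun i => (PySem.List.pyRange 0 min_section_size 1).map
      (fun k => (PySem.List.pyGet? data (i + k * sections_cnt)).getD 0))
  (PySem.List.slice cols none (some x_sections_cnt),
   PySem.List.slice cols (some x_sections_cnt) none)

-- ===== PRECONDITION & SPEC =====
-- Pre_ excludes exactly the inputs on which A raises: sections_cnt = 0 gives
-- ZeroDivisionError, and x_sections_cnt < 1 or y_sections_cnt < 1 gives ValueError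
-- (min() of an empty sequence); A returns on everything else.
def Pre_slice_to_sections (data : List Int) (x_sections_cnt : Int) (y_sections_cnt : Int) : Prop :=
  1 ≤ x_sections_cnt ∧ 1 ≤ y_sections_cnt
instance (data : List Int) (x_sections_cnt : Int) (y_sections_cnt : Int) : Decidable (Pre_slice_to_sections data x_sections_cnt y_sections_cnt) := by unfold Pre_slice_to_sections; infer_instance
def pvWitness_slice_to_sections : List Int × Int × Int := ([5, -3, 7, 2, 9, 4, 1], 2, 1)

def Spec_slice_to_sections (data : List Int) (x_sections_cnt : Int) (y_sections_cnt : Int) (out : List (List Int) × List (List Int)) : Prop := out = slice_to_sections_alt data x_sections_cnt y_sections_cnt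
instance (data : List Int) (x_sections_cnt : Int) (y_sections_cnt : Int) (out : List (List Int) × List (List Int)) : Decidable (Spec_slice_to_sections data x_sections_cnt y_sections_cnt out) := by unfold Spec_slice_to_sections; infer_instance

-- ===== CLAIM (what is proved, stated in full; the proofs are below) =====
def Claim_equal_slice_to_sections : Prop := ∀ (data : List Int) (x_sections_cnt : Int) (y_sections_cnt : Int), Dom_slice_to_sections data x_sections_cnt y_sections_cnt → Pre_slice_to_sections data x_sections_cnt y_sections_cnt → Spec_slice_to_sections data x_sections_cnt y_sections_cnt (slice_to_sections data x_sections_cnt y_sections_cnt)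
-- ===== LEMMAS AND PROOFS =====

-- length of the Python slice data[i::s] (0 ≤ i, 0 < s)
def cntA (n i s : Nat) : Nat := if i < n then (n - i + s - 1) / s else 0

lemma sliceA (data : List Int) (i s : Nat) (hs : 0 < s) :
    PySem.List.slice? data (some (i:Int)) none (s:Int) =
      some ((List.range (cntA data.length i s)).map (fun k => data.getD (i + s*k) 0)) := by
  unfold PySem.List.slice? PySem.List.sliceIndices
  have hs' : ¬ ((s:Int) = 0) := by exact_mod_cast hs.ne'
  have hs2 : ¬ ((s:Int) < 0) := by omega
  have hi : ¬ ((i:Int) < 0) := by omega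
  simp only [hs', hs2, hi, if_false]
  by_cases hin : i < data.length
  · have hmin : min (i:Int) (data.length:Int) = (i:Int) := by omega
    have hlt : min (i:Int) (data.length:Int) < (data.length:Int) := by omega
    have hcast : ((data.length:Int) - (min (i:Int) (data.length:Int)) + (s:Int) - 1) = ((data.length - i + s - 1 : Nat) : Int) := by omega
    have hpos : (0:Int) < (s:Int) := by exact_mod_cast hs
    simp only [hpos, hlt, if_pos, hcast]
    rw [show (((data.length - i + s - 1 : Nat) : Int) / (s:Int)).toNat = cntA data.length i s by
      unfold cntA
      rw [if_pos hin, ← Int.natCast_div]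
      exact Int.toNat_natCast _]
    congr 1
    rw [List.filterMap_congr (g := fun k => some (data.getD (i + s*k) 0)) ?_]
    · simp
    intro k hk
    simp only [List.mem_range] at hk
    have hidx : (min (i:Int) (data.length:Int) + (s:Int) * (k:Int)).toNat = i + s * k := by
      rw [hmin, show ((i:Int) + (s:Int)*(k:Int)) = ((i + s*k : Nat) : Int) by push_cast; ring, Int.toNat_natCast]
    rw [hidx]
    have hbound : i + s * k < data.length := by
      unfold cntA at hk
      rw [if_pos hin] at hk
      have h1 : s * (k+1) ≤ s * ((data.length - i + s - 1) / s) :=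
        Nat.mul_le_mul_left s hk
      have h2 : s * ((data.length - i + s - 1) / s) ≤ data.length - i + s - 1 := by
        rw [Nat.mul_comm]; exact Nat.div_mul_le_self _ _
      rw [Nat.mul_succ] at h1
      omega
    rw [List.getElem?_eq_getElem hbound]
    simp [List.getD, List.getElem?_eq_getElem hbound]
  · have hlt : ¬ (min (i:Int) (data.length:Int) < (data.length:Int)) := by omega
    have hlt2 : ¬ ((data.length:Int) < min (i:Int) (data.length:Int)) := by omega
    have hc : cntA data.length i s = 0 := by unfold cntA; rw [if_neg hin]
    simp [hlt, hlt2, hc]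

lemma cntA_ge (n i s : Nat) (hi : i < s) : n / s ≤ cntA n i s := by
  unfold cntA
  by_cases hin : i < n
  · rw [if_pos hin]
    exact Nat.div_le_div_right (by omega)
  · rw [if_neg hin]
    have : n < s := by omega
    simp [Nat.div_eq_of_lt this]

lemma cntA_last (n s : Nat) (hs : 0 < s) : cntA n (s-1) s = n / s := by
  unfold cntA
  by_cases hin : s - 1 < n
  · rw [if_pos hin]
    congr 1
    omega
  · rw [if_neg hin]
    have : n < s := by omega
    simp [Nat.div_eq_of_lt this]

lemma take_map_range {α : Type} (f : Nat → α) (m c : Nat) (h : m ≤ c) :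
    ((List.range c).map f).take m = (List.range m).map f := by
  rw [← List.map_take, List.take_range]
  rw [Nat.min_eq_left h]

theorem slice_to_sections_spec : Claim_equal_slice_to_sections := by
  intro data x y _hdom hpre
  obtain ⟨hx, hy⟩ := hpre
  unfold Spec_slice_to_sections
  obtain ⟨a, rfl⟩ : ∃ a : Nat, x = (a:Int) := ⟨x.toNat, (Int.toNat_of_nonneg (by omega)).symm⟩
  obtain ⟨b, rfl⟩ : ∃ b : Nat, y = (b:Int) := ⟨y.toNat, (Int.toNat_of_nonneg (by omega)).symm⟩
  have ha : 1 ≤ a := by exact_mod_cast hx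
  have hb : 1 ≤ b := by exact_mod_cast hy
  have hs : 0 < a + b := by omega
  have hcast : ((a:Int) + (b:Int)) = (((a+b : Nat)):Int) := by push_cast; ring
  have hR1 := PySem.List.pyRange_zero_natCast a
  have hR2 : PySem.List.pyRange (a:Int) ((a:Int)+(b:Int)) 1 = (List.range b).map (fun j => ((a + j : Nat):Int)) := by
    rw [PySem.List.pyRange_of_pos _ _ (by norm_num : (0:Int) < 1)]
    rw [if_pos (by omega : (a:Int) < (a:Int)+(b:Int))]
    have : (((a:Int)+(b:Int) - (a:Int) + 1 - 1) / 1).toNat = b := by simp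
    rw [this]
    apply List.map_congr_left
    intro k _
    push_cast
    ring
  have hsl : ∀ i : Nat, PySem.List.slice? data (some (i:Int)) none ((a+b : Nat):Int) =
      some ((List.range (cntA data.length i (a+b))).map (fun k => data.getD (i + (a+b)*k) 0)) :=
    fun i => sliceA data i (a+b) hs
  have hidx : ∀ i k : Nat, ((i:Int) + (k:Int) * (((a+b : Nat)):Int)) = (((i + k*(a+b) : Nat)):Int) := by
    intro i k; push_cast; ring
  have hgd : ∀ j : Nat, (data[j]?).getD 0 = data.getD j 0 := by
    intro j; rw [List.getD_eq_getElem?_getD]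
  simp only [slice_to_sections, slice_to_sections_alt]
  rw [hcast] at hR2
  simp only [hcast, hR1, hR2, List.foldl_map, PySem.List.foldl_append_singleton_eq_map,
    List.nil_append, List.map_map, Function.comp_def, hsl, Option.getD_some,
    List.length_map, List.length_range, PySem.Int.floordiv_natCast,
    PySem.List.pyRange_zero_natCast, hidx, PySem.List.pyGet?_natCast, hgd,
    PySem.List.slice_to_natCast, PySem.List.slice_from_natCast]
  -- evaluate the two min() scans
  have hminx : ∀ v ∈ List.map (fun x => ((cntA data.length x (a + b) : Nat) : Int)) (List.range a),
      ((data.length / (a+b) : Nat) : Int) ≤ v := by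
    intro v hv
    obtain ⟨i, hi, rfl⟩ := List.mem_map.mp hv
    simp only [List.mem_range] at hi
    exact_mod_cast cntA_ge data.length i (a+b) (by omega)
  have hminy : (PySem.List.min? (List.map (fun x => ((cntA data.length (a + x) (a + b) : Nat) : Int)) (List.range b)) (fun v => v)).getD 0
      = ((data.length / (a+b) : Nat) : Int) := by
    have hmem : ((data.length / (a+b) : Nat) : Int) ∈
        List.map (fun x => ((cntA data.length (a + x) (a + b) : Nat) : Int)) (List.range b) := by
      refine List.mem_map.mpr ⟨b - 1, by simp; omega, ?_⟩
      rw [show a + (b-1) = (a+b) - 1 by omega, cntA_last data.length (a+b) hs]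
    cases hsome : PySem.List.min? (List.map (fun x => ((cntA data.length (a + x) (a + b) : Nat) : Int)) (List.range b)) (fun v => v) with
    | none =>
        rw [PySem.List.min?_eq_none_iff] at hsome
        rw [hsome] at hmem
        simp at hmem
    | some v =>
        have hvm := PySem.List.min?_mem hsome
        obtain ⟨j, hj, hveq⟩ := List.mem_map.mp hvm
        simp only [List.mem_range] at hj
        have hge : ((data.length / (a+b) : Nat) : Int) ≤ v := by
          rw [← hveq]
          exact_mod_cast cntA_ge data.length (a+j) (a+b) (by omega)
        have hle := PySem.List.min?_isMin hsome _ hmem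
        simp only [Option.getD_some]
        omega
  rw [hminy]
  cases hsome : PySem.List.min? (List.map (fun x => ((cntA data.length x (a + b) : Nat) : Int)) (List.range a)) (fun v => v) with
  | none =>
      rw [PySem.List.min?_eq_none_iff] at hsome
      have : (0:Nat) < a := ha
      simp [List.map_eq_nil_iff, List.range_eq_nil] at hsome
      omega
  | some v =>
      have hge : ((data.length / (a+b) : Nat) : Int) ≤ v := hminx v (PySem.List.min?_mem hsome)
      simp only [Option.getD_some]
      rw [min_eq_right hge]
      simp only [PySem.List.slice_to_natCast]
      have hmle : ∀ i : Nat, i < a + b → data.length / (a+b) ≤ cntA data.length i (a+b) :=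
        fun i hi => cntA_ge data.length i (a+b) hi
      refine Prod.ext ?_ ?_ <;> simp only []
      · rw [← List.map_take, List.take_range, Nat.min_eq_left (by omega : a ≤ a + b)]
        apply List.map_congr_left
        intro i hi
        simp only [List.mem_range] at hi
        rw [take_map_range _ _ _ (hmle i (by omega))]
        apply List.map_congr_left
        intro k _
        rw [Nat.mul_comm]
      · rw [← List.map_drop, show (List.range (a+b)).drop a = (List.range b).map (fun j => a + j) by
              simp [List.range_add],
            List.map_map]
        apply List.map_congr_left
        intro j hj
        simp only [List.mem_range] at hj
        rw [Function.comp_apply, take_map_range _ _ _ (hmle (a + j) (by omega))]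
        apply List.map_congr_left
        intro k _
        rw [Nat.mul_comm]
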